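-- pv_equiv track=rewrite | github.com/lvaughn/advent | 2019_redux/17/part_1.py | first_sub_array
-- ===== SOURCE A (Python) =====
-- def first_sub_array(move_ls):
--     start = 0
--     while start < len(move_ls) and move_ls[start] in ('A', 'B', 'C'):
--         start += 1
--     end = start
--     while end < len(move_ls) and move_ls[end] not in ('A', 'B', 'C'):
--         end += 1
--     return move_ls[start:end]
-- ===== SOURCE B (Python) =====
-- def first_sub_array(move_ls):
--     out = []
--     started = False
--     for m in move_ls:
--         if m in ('A', 'B', 'C'):
--             if started:
--                 break
--         else:
--             started = True
--             out.append(m)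
--     return out
-- ===== Notes on version B (the rewrite author's own statement) =====
-- stated objective: simpler
-- what changed: Replaces the two index-advancing while-loops plus a slice with one for-loop over the elements that uses a started flag and builds the result list directly, with no index arithmetic or slicing.
import Mathlib
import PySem

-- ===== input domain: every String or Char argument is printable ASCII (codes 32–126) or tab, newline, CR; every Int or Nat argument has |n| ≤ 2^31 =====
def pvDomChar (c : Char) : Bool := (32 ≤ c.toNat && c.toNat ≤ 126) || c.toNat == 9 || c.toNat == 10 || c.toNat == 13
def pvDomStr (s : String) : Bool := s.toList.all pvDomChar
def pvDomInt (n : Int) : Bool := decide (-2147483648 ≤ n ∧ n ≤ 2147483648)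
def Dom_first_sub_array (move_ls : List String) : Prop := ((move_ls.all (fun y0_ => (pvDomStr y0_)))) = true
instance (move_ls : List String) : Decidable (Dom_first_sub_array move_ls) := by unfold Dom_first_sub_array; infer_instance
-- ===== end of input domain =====

-- B is the same linear scan done as one element-wise pass with a 'started' flag and a
-- result accumulator, instead of A's two index-advancing while-loops followed by a slice.

-- ===== PORT A =====
-- m in ('A','B','C')
def pvIsABC (m : String) : Bool := m == "A" || m == "B" || m == "C"

-- while start < len(move_ls) and move_ls[start] in ('A','B','C'): start += 1
def pvLoop1 (move_ls : List String) (start : Nat) : Nat :=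
  if h : start < move_ls.length ∧ pvIsABC (move_ls.getD start "") then
    pvLoop1 move_ls (start + 1)
  else start
termination_by move_ls.length - start
decreasing_by omega

-- while end < len(move_ls) and move_ls[end] not in ('A','B','C'): end += 1
def pvLoop2 (move_ls : List String) (e : Nat) : Nat :=
  if h : e < move_ls.length ∧ ¬ pvIsABC (move_ls.getD e "") then
    pvLoop2 move_ls (e + 1)
  else e
termination_by move_ls.length - e
decreasing_by omega

def first_sub_array (move_ls : List String) : List String :=
  let start := pvLoop1 move_ls 0
  let e := pvLoop2 move_ls start
  PySem.List.slice move_ls (some (start : Int)) (some (e : Int))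

-- ===== PORT B =====
-- for m in move_ls: … with a 'started' flag, 'out' accumulator and break
def pvAltLoop (ls : List String) (started : Bool) (out : List String) : List String :=
  match ls with
  | [] => out
  | m :: rest =>
    if pvIsABC m then
      if started then out else pvAltLoop rest started out
    else
      pvAltLoop rest true (out ++ [m])

def first_sub_array_alt (move_ls : List String) : List String :=
  pvAltLoop move_ls false []

-- ===== PRECONDITION & SPEC =====
def Spec_first_sub_array (move_ls : List String) (out : List String) : Prop := out = first_sub_array_alt move_ls
instance (move_ls : List String) (out : List String) : Decidable (Spec_first_sub_array move_ls out) := by unfold Spec_first_sub_array; infer_instance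

-- ===== CLAIM (what is proved, stated in full; the proofs are below) =====
def Claim_equal_first_sub_array : Prop := ∀ (move_ls : List String), Dom_first_sub_array move_ls → Spec_first_sub_array move_ls (first_sub_array move_ls)

-- ===== LEMMAS AND PROOFS =====

-- A's first loop, run on the whole list, stops after the leading ABC prefix.
theorem pvLoop1_char (pre move_ls : List String)
    (hpre : ∀ m ∈ pre, pvIsABC m = true) :
    pvLoop1 (pre ++ move_ls) pre.length =
      pre.length + (move_ls.takeWhile pvIsABC).length := by
  induction move_ls generalizing pre with
  | nil =>
    rw [pvLoop1]
    simp
  | cons m rest ih =>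
    rw [pvLoop1]
    by_cases hm : pvIsABC m = true
    · have hget : (pre ++ m :: rest).getD pre.length "" = m := by
        simp [List.getD]
      have hlen : pre.length < (pre ++ m :: rest).length := by simp
      rw [dif_pos ⟨hlen, by rw [hget]; exact hm⟩]
      have := ih (pre ++ [m]) (by
        intro x hx
        rcases List.mem_append.mp hx with h | h
        · exact hpre x h
        · simp at h; subst h; exact hm)
      simpa [List.takeWhile_cons, hm, Nat.add_assoc, Nat.add_comm 1] using this
    · have hget : (pre ++ m :: rest).getD pre.length "" = m := by
        simp [List.getD]
      rw [dif_neg (by rw [hget]; simp [hm])]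
      simp [hm]

-- A's second loop stops after the non-ABC run.
theorem pvLoop2_char (pre move_ls : List String)
    (hpre : ∀ m ∈ pre, True) :
    pvLoop2 (pre ++ move_ls) pre.length =
      pre.length + (move_ls.takeWhile (fun m => ! pvIsABC m)).length := by
  induction move_ls generalizing pre with
  | nil =>
    rw [pvLoop2]
    simp
  | cons m rest ih =>
    rw [pvLoop2]
    have hget : (pre ++ m :: rest).getD pre.length "" = m := by
      simp [List.getD]
    by_cases hm : pvIsABC m = true
    · rw [dif_neg (by rw [hget]; simp [hm])]
      simp [hm]
    · have hlen : pre.length < (pre ++ m :: rest).length := by simp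
      rw [dif_pos ⟨hlen, by rw [hget]; simp [hm]⟩]
      have := ih (pre ++ [m]) (fun _ _ => trivial)
      simpa [List.takeWhile_cons, hm, Nat.add_assoc, Nat.add_comm 1] using this

-- A computes dropWhile-then-takeWhile.
theorem first_sub_array_char (move_ls : List String) :
    first_sub_array move_ls =
      (move_ls.dropWhile pvIsABC).takeWhile (fun m => ! pvIsABC m) := by
  have hA : first_sub_array move_ls =
      PySem.List.slice move_ls (some ((pvLoop1 move_ls 0 : Nat) : Int))
        (some ((pvLoop2 move_ls (pvLoop1 move_ls 0) : Nat) : Int)) := rfl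
  rw [hA]
  have h1 : pvLoop1 move_ls 0 = (move_ls.takeWhile pvIsABC).length := by
    simpa using pvLoop1_char [] move_ls (by simp)
  set t := move_ls.takeWhile pvIsABC with ht
  set d := move_ls.dropWhile pvIsABC with hd
  have hsplit : move_ls = t ++ d := (List.takeWhile_append_dropWhile (p := pvIsABC) (l := move_ls)).symm
  have h2 : pvLoop2 move_ls (pvLoop1 move_ls 0) =
      t.length + (d.takeWhile (fun m => ! pvIsABC m)).length := by
    rw [h1, hsplit]
    exact pvLoop2_char t d (fun _ _ => trivial)
  rw [h2, h1]
  have : PySem.List.slice move_ls (some (t.length : Int))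
      (some ((t.length : Int) + ((d.takeWhile (fun m => ! pvIsABC m)).length : Int))) =
      (move_ls.drop t.length).take (d.takeWhile (fun m => ! pvIsABC m)).length :=
    PySem.List.slice_natCast_add move_ls t.length (d.takeWhile (fun m => ! pvIsABC m)).length
  rw [show ((t.length + (d.takeWhile (fun m => ! pvIsABC m)).length : Nat) : Int)
      = (t.length : Int) + ((d.takeWhile (fun m => ! pvIsABC m)).length : Nat) by push_cast; ring]
  rw [this]
  conv_lhs => rw [hsplit]
  rw [List.drop_left]
  have htl := List.take_left (l₁ := d.takeWhile (fun m => ! pvIsABC m))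
    (l₂ := d.dropWhile (fun m => ! pvIsABC m))
  rwa [List.takeWhile_append_dropWhile] at htl

-- B, once started, appends the non-ABC run to the accumulator.
theorem pvAltLoop_true (ls out : List String) :
    pvAltLoop ls true out = out ++ ls.takeWhile (fun m => ! pvIsABC m) := by
  induction ls generalizing out with
  | nil => simp [pvAltLoop]
  | cons m rest ih =>
    by_cases hm : pvIsABC m = true
    · simp [pvAltLoop, hm]
    · simp [pvAltLoop, hm, ih]

-- B computes dropWhile-then-takeWhile.
theorem first_sub_array_alt_char (move_ls : List String) :
    first_sub_array_alt move_ls =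
      (move_ls.dropWhile pvIsABC).takeWhile (fun m => ! pvIsABC m) := by
  unfold first_sub_array_alt
  induction move_ls with
  | nil => simp [pvAltLoop]
  | cons m rest ih =>
    by_cases hm : pvIsABC m = true
    · simpa [pvAltLoop, hm, List.dropWhile_cons] using ih
    · simp [pvAltLoop, hm, pvAltLoop_true]

-- ===== VERDICT (by name: the statement is the Claim_ definition above) =====
theorem first_sub_array_spec : Claim_equal_first_sub_array := by
  intro move_ls _
  unfold Spec_first_sub_array
  rw [first_sub_array_char, first_sub_array_alt_char]
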